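-- pv_equiv track=rewrite | github.com/backordinary/QDP-FSL | source/0/simulator_20220407183500_f7cfd4.py | spin_combinations
-- ===== SOURCE A (Python) =====
-- import itertools
--
-- def convert_site(site, N):
--     # this function perform the site index conversion as follows:
--     # 01234, then convert, e.g. 0 to 4, 1 to 3, etc.
--     if N % 2 == 0:
--         return int(N/2-site+1)
--     elif N % 2 == 1:
--         M = (N-1)/2
--         return int(M + (M-site))
--
-- def spin_combinations(j, N):
--     # j is the site index which counts from the l.h.s. in the physical dimension
--     # we convert j to ibm_site which counts from the r.h.s.
--     combi = list(itertools.product(['0', '1'], repeat=N-1))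
--     bits = []
--     for i in range(2**(N-1)):
--         bits.append(''.join(combi[i]))
--     spin_up = []
--     site = convert_site(j, N)
--     for i in range(2**(N-1)):
--         spin_up.append(bits[i][:site] + '0' + bits[i][site:])
--     spin_down = []
--     for i in range(2**(N-1)):
--         spin_down.append(bits[i][:site] + '1' + bits[i][site:])
--     return spin_up, spin_down
-- ===== SOURCE B (Python) =====
-- def convert_site(site, N):
--     # this function perform the site index conversion as follows:
--     # 01234, then convert, e.g. 0 to 4, 1 to 3, etc.
--     if N % 2 == 0:
--         return int(N/2-site+1)
--     elif N % 2 == 1: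
--         M = (N-1)/2
--         return int(M + (M-site))
--
-- def spin_combinations(j, N):
--     # Build the 2**(N-1) bit strings by repeated doubling: start from [''] and,
--     # N-1 times, prefix every string with '0' and with '1' (prefixing the new
--     # most significant bit keeps the list in lexicographic order, the order
--     # itertools.product yields).  No index arithmetic, no join, no 2**n count.
--     site = convert_site(j, N)
--     bits = ['']
--     for _ in range(N - 1):
--         bits = ['0' + s for s in bits] + ['1' + s for s in bits]
--     spin_up = [s[:site] + '0' + s[site:] for s in bits]
--     spin_down = [s[:site] + '1' + s[site:] for s in bits]
--     return spin_up, spin_down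
-- ===== Notes on version B (the rewrite author's own statement) =====
-- stated objective: alternative
-- what changed: B generates the bit strings by recursive doubling (N-1 rounds of prefixing '0' and '1' to an accumulated list) instead of enumerating indices 0..2**(N-1)-1 against an itertools.product table, and builds both output lists as direct comprehensions over that list; it trades the per-string index/join work for incremental list doubling at the same asymptotic cost.
import Mathlib
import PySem

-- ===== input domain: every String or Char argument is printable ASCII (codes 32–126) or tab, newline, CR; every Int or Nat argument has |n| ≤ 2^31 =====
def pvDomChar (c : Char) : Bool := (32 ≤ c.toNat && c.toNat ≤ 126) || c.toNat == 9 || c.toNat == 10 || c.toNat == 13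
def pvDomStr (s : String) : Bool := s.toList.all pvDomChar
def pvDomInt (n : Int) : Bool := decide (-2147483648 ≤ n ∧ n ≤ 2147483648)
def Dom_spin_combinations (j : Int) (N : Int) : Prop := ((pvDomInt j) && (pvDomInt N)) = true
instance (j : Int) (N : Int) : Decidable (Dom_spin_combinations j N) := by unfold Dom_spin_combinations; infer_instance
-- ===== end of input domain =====

-- B generates the bit strings by recursive doubling (N-1 rounds of prefixing '0'/'1' to an
-- accumulated list) instead of A's index enumeration over an itertools.product table (objective: alternative).

-- ===== PORT A =====
-- helper convert_site appears byte-for-byte in Source A and in Source B, so both ports share it.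
-- Python computes with float division N/2 resp. (N-1)/2; the numerator is even in each
-- branch and |N| ≤ 2^31, so the float value is integral and exact and int(...) is the
-- identity: we port with integer floordiv (exact here).
def convert_site (site : Int) (N : Int) : Int :=
  if PySem.Int.mod N 2 = 0 then
    PySem.Int.floordiv N 2 - site + 1
  else
    -- elif N % 2 == 1: for a Python int this is the only remaining case
    let M := PySem.Int.floordiv (N - 1) 2
    M + (M - site)

-- itertools.product(['0','1'], repeat=n): lexicographic, first coordinate slowest
def prodRep01 : Nat → List (List String)
  | 0 => [[]]
  | n+1 => (["0", "1"] : List String).flatMap (fun c => (prodRep01 n).map (fun t => c :: t))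

def spin_combinations (j : Int) (N : Int) : List String × List String :=
  -- repeat = N-1 and 2**(N-1): (N-1).toNat is exact under Pre_ (1 ≤ N); Python raises for N < 1
  let combi := prodRep01 (N - 1).toNat
  let size : Int := (2 : Int) ^ (N - 1).toNat
  let bits := (PySem.List.pyRange 0 size 1).foldl
    (fun acc i => acc ++ [PySem.Str.join "" (PySem.List.pyGetD combi i [])]) []
  let site := convert_site j N
  let spin_up := (PySem.List.pyRange 0 size 1).foldl
    (fun acc i => acc ++ [PySem.Str.slice (PySem.List.pyGetD bits i "") none (some site)
        ++ "0" ++ PySem.Str.slice (PySem.List.pyGetD bits i "") (some site) none]) []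
  let spin_down := (PySem.List.pyRange 0 size 1).foldl
    (fun acc i => acc ++ [PySem.Str.slice (PySem.List.pyGetD bits i "") none (some site)
        ++ "1" ++ PySem.Str.slice (PySem.List.pyGetD bits i "") (some site) none]) []
  (spin_up, spin_down)

-- ===== PORT B =====
def spin_combinations_alt (j : Int) (N : Int) : List String × List String :=
  let site := convert_site j N
  -- for _ in range(N-1): bits = ['0'+s for s in bits] + ['1'+s for s in bits]
  let bits := (PySem.List.pyRange 0 (N - 1) 1).foldl
    (fun b _ => b.map (fun s => "0" ++ s) ++ b.map (fun s => "1" ++ s)) [""]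
  (bits.map (fun s => PySem.Str.slice s none (some site) ++ "0" ++ PySem.Str.slice s (some site) none),
   bits.map (fun s => PySem.Str.slice s none (some site) ++ "1" ++ PySem.Str.slice s (some site) none))

-- ===== PRECONDITION & SPEC =====
-- Python A raises ValueError (itertools.product with a negative repeat) for N < 1, so those inputs are excluded.
def Pre_spin_combinations (j : Int) (N : Int) : Prop := 1 ≤ N
instance (j : Int) (N : Int) : Decidable (Pre_spin_combinations j N) := by unfold Pre_spin_combinations; infer_instance
def pvWitness_spin_combinations : Int × Int := (0, 3)

def Spec_spin_combinations (j : Int) (N : Int) (out : List String × List String) : Prop := out = spin_combinations_alt j N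
instance (j : Int) (N : Int) (out : List String × List String) : Decidable (Spec_spin_combinations j N out) := by unfold Spec_spin_combinations; infer_instance

-- ===== CLAIM (what is proved, stated in full; the proofs are below) =====
def Claim_equal_spin_combinations : Prop := ∀ (j : Int) (N : Int), Dom_spin_combinations j N → Pre_spin_combinations j N → Spec_spin_combinations j N (spin_combinations j N)

-- ===== LEMMAS AND PROOFS =====

lemma length_prodRep01 (n : Nat) : (prodRep01 n).length = 2 ^ n := by
  induction n with
  | zero => rfl
  | succ n ih => simp [prodRep01, ih, pow_succ]; ring

lemma join_empty_cons (a : String) (t : List String) :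
    PySem.Str.join "" (a :: t) = a ++ PySem.Str.join "" t := by
  simp only [PySem.Str.join, PySem.Chars.join, List.intercalate]
  cases t <;> simp [String.ofList_append]

-- B's doubling fold over range n builds exactly A's joined product rows
lemma doubling_eq_join_prodRep01 (n : Nat) :
    (List.range n).foldl
      (fun (b : List String) _ => b.map (fun s => "0" ++ s) ++ b.map (fun s => "1" ++ s)) [""]
    = (prodRep01 n).map (PySem.Str.join "") := by
  induction n with
  | zero => decide
  | succ n ih =>
      rw [List.range_succ, List.foldl_append, ih]
      simp only [List.foldl_cons, List.foldl_nil, prodRep01, List.flatMap_cons, List.flatMap_nil,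
        List.append_nil, List.map_append, List.map_map]
      congr 1 <;>
      · apply List.map_congr_left
        intro t _
        simp only [Function.comp_apply, join_empty_cons]

theorem spin_combinations_spec : Claim_equal_spin_combinations := by
  intro j N _ hPre
  unfold Spec_spin_combinations spin_combinations spin_combinations_alt
  have hN : 1 ≤ N := hPre
  obtain ⟨n, hn⟩ : ∃ n : Nat, N - 1 = (n : Int) := ⟨(N - 1).toNat, by omega⟩
  simp only []
  rw [hn]
  simp only [Int.toNat_natCast]
  set site := convert_site j N with hsite
  have hcast : ((2 : Int) ^ n) = (((2 ^ n : Nat) : Int)) := by push_cast; ring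
  -- A side: bits = map join (prodRep01 n)
  have hlen : (prodRep01 n).length = 2 ^ n := length_prodRep01 n
  have hbits :
      (PySem.List.pyRange 0 ((2 : Int) ^ n) 1).foldl
        (fun acc i => acc ++ [PySem.Str.join "" (PySem.List.pyGetD (prodRep01 n) i [])]) []
      = (prodRep01 n).map (PySem.Str.join "") := by
    rw [hcast, ← hlen]
    rw [PySem.List.foldl_pyRange_zero_pyGetD' (prodRep01 n) []
      (fun acc t => acc ++ [PySem.Str.join "" t]) []]
    rw [PySem.List.foldl_append_singleton_eq_map]
    simp
  rw [hbits]
  -- A side: each spin loop is a map over bits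
  have hlen2 : ((prodRep01 n).map (PySem.Str.join "")).length = 2 ^ n := by simp [hlen]
  have hloop : ∀ c : String,
      (PySem.List.pyRange 0 ((2 : Int) ^ n) 1).foldl
        (fun acc i => acc ++ [PySem.Str.slice (PySem.List.pyGetD ((prodRep01 n).map (PySem.Str.join "")) i "") none (some site)
            ++ c ++ PySem.Str.slice (PySem.List.pyGetD ((prodRep01 n).map (PySem.Str.join "")) i "") (some site) none]) []
      = ((prodRep01 n).map (PySem.Str.join "")).map
          (fun s => PySem.Str.slice s none (some site) ++ c ++ PySem.Str.slice s (some site) none) := by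
    intro c
    rw [hcast, ← hlen2]
    rw [PySem.List.foldl_pyRange_zero_pyGetD' ((prodRep01 n).map (PySem.Str.join "")) ""
      (fun acc s => acc ++ [PySem.Str.slice s none (some site) ++ c ++ PySem.Str.slice s (some site) none]) []]
    rw [PySem.List.foldl_append_singleton_eq_map]
    simp
  rw [hloop "0", hloop "1"]
  -- B side: the doubling fold ignores the loop index, so it is a fold over List.range n
  have hB : (PySem.List.pyRange 0 ((n : Int)) 1).foldl
      (fun (b : List String) _ => b.map (fun s => "0" ++ s) ++ b.map (fun s => "1" ++ s)) [""]
      = (prodRep01 n).map (PySem.Str.join "") := by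
    rw [PySem.List.pyRange_zero_nat, List.foldl_map, doubling_eq_join_prodRep01]
  rw [hB]
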